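-- pv_equiv track=rewrite | github.com/techwiz42/agent_framework | backend/app/services/agents/accounting_agent.py | _identify_transaction_type
-- ===== SOURCE A (Python) =====
-- def _identify_transaction_type(transaction_description: str) -> str:
--     """
--     Identify the transaction type from a description.
--
--     Args:
--         transaction_description: Description of the transaction.
--
--     Returns:
--         The identified transaction type.
--     """
--     # Dictionary mapping keywords to transaction types
--     transaction_keywords = {
--         "revenue_recognition": ["revenue", "sales", "income", "customer", "contract"],
--         "leases": ["lease", "rent", "rental"],
--         "inventory": ["inventory", "stock", "goods", "merchandise"],
--         "fixed_assets": ["equipment", "property", "plant", "building", "machine"],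
--         "intangible_assets": ["intangible", "goodwill", "trademark", "patent"],
--         "depreciation": ["depreciation", "depreciate"],
--         "impairment": ["impairment", "impair", "write-down", "write down"],
--         "debt": ["loan", "debt", "borrow", "borrowing", "credit"],
--         "equity": ["equity", "stock", "share", "capital"],
--         "investments": ["investment", "invest", "security", "securities"],
--         "business_combinations": ["acquisition", "merge", "merger", "acquire"],
--         "contingencies": ["contingent", "contingency", "lawsuit", "litigation"],
--         "fair_value": ["fair value", "market value"],
--         "income_taxes": ["tax", "income tax"],
--         "foreign_currency": ["foreign", "currency", "exchange rate"],
--         "stock_compensation": ["stock option", "equity award", "stock award"],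
--         "pensions": ["pension", "retirement", "benefit"],
--         "accruals": ["accrual", "accrue", "provision"]
--     }
--
--     # Convert description to lowercase
--     desc_lower = transaction_description.lower()
--
--     # Find matching transaction types
--     matching_types = []
--     for tx_type, keywords in transaction_keywords.items():
--         for keyword in keywords:
--             if keyword in desc_lower:
--                 matching_types.append(tx_type)
--                 break
--
--     # Return the most specific match or a default
--     if matching_types:
--         # If multiple matches, prioritize certain types
--         priority_order = [
--             "revenue_recognition", "leases", "inventory", "fixed_assets",
--             "intangible_assets", "depreciation", "impairment"
--         ]
--
--         for priority_type in priority_order: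
--             if priority_type in matching_types:
--                 return priority_type
--
--         # If no priority match, return the first match
--         return matching_types[0]
--
--     # Default to general if no match found
--     return "general"
-- ===== SOURCE B (Python) =====
-- _KEYWORD_TYPES = [
--     ("revenue", "revenue_recognition"),
--     ("sales", "revenue_recognition"),
--     ("income", "revenue_recognition"),
--     ("customer", "revenue_recognition"),
--     ("contract", "revenue_recognition"),
--     ("lease", "leases"),
--     ("rent", "leases"),
--     ("rental", "leases"),
--     ("inventory", "inventory"),
--     ("stock", "inventory"),
--     ("goods", "inventory"),
--     ("merchandise", "inventory"),
--     ("equipment", "fixed_assets"),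
--     ("property", "fixed_assets"),
--     ("plant", "fixed_assets"),
--     ("building", "fixed_assets"),
--     ("machine", "fixed_assets"),
--     ("intangible", "intangible_assets"),
--     ("goodwill", "intangible_assets"),
--     ("trademark", "intangible_assets"),
--     ("patent", "intangible_assets"),
--     ("depreciation", "depreciation"),
--     ("depreciate", "depreciation"),
--     ("impairment", "impairment"),
--     ("impair", "impairment"),
--     ("write-down", "impairment"),
--     ("write down", "impairment"),
--     ("loan", "debt"),
--     ("debt", "debt"),
--     ("borrow", "debt"),
--     ("borrowing", "debt"),
--     ("credit", "debt"),
--     ("equity", "equity"),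
--     ("stock", "equity"),
--     ("share", "equity"),
--     ("capital", "equity"),
--     ("investment", "investments"),
--     ("invest", "investments"),
--     ("security", "investments"),
--     ("securities", "investments"),
--     ("acquisition", "business_combinations"),
--     ("merge", "business_combinations"),
--     ("merger", "business_combinations"),
--     ("acquire", "business_combinations"),
--     ("contingent", "contingencies"),
--     ("contingency", "contingencies"),
--     ("lawsuit", "contingencies"),
--     ("litigation", "contingencies"),
--     ("fair value", "fair_value"),
--     ("market value", "fair_value"),
--     ("tax", "income_taxes"),
--     ("income tax", "income_taxes"),
--     ("foreign", "foreign_currency"),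
--     ("currency", "foreign_currency"),
--     ("exchange rate", "foreign_currency"),
--     ("stock option", "stock_compensation"),
--     ("equity award", "stock_compensation"),
--     ("stock award", "stock_compensation"),
--     ("pension", "pensions"),
--     ("retirement", "pensions"),
--     ("benefit", "pensions"),
--     ("accrual", "accruals"),
--     ("accrue", "accruals"),
--     ("provision", "accruals")
-- ]
--
-- def _identify_transaction_type(transaction_description: str) -> str:
--     """Identify the transaction type: first (keyword, type) pair whose keyword occurs in the lowered description."""
--     desc_lower = transaction_description.lower()
--     for keyword, tx_type in _KEYWORD_TYPES:
--         if keyword in desc_lower: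
--             return tx_type
--     return "general"
-- ===== Notes on version B (the rewrite author's own statement) =====
-- stated objective: simpler
-- what changed: B replaces A's type-keyed dict, collect-all-matches list and separate priority pass by a flat (keyword, type) pair list scanned once, returning the type of the first keyword found in the lowered description; equal because A's priority_order is exactly the first seven dict keys, so A always yields the first dict-order match.
import Mathlib
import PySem

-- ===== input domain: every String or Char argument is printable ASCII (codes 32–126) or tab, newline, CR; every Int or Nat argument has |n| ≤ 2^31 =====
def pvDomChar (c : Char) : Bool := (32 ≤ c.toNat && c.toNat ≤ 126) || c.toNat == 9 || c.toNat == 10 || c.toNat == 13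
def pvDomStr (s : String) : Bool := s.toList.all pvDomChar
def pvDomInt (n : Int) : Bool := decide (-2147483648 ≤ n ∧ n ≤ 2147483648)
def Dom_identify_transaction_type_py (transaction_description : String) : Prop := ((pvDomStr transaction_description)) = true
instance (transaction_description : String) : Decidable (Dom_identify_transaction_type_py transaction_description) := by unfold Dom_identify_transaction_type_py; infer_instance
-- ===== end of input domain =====

-- B flattens A's type-keyed dict into a (keyword, type) pair list scanned once for the
-- first keyword occurring in the lowered description, dropping A's collect-all-matches
-- list and separate priority pass (simpler; equal because A's priority_order is exactly
-- the first seven dict keys).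

-- ===== PORT A =====
-- the transaction_keywords dict of A, in insertion order
def pvKeywordTable : List (String × List String) :=
  [("revenue_recognition", ["revenue", "sales", "income", "customer", "contract"]),
   ("leases", ["lease", "rent", "rental"]),
   ("inventory", ["inventory", "stock", "goods", "merchandise"]),
   ("fixed_assets", ["equipment", "property", "plant", "building", "machine"]),
   ("intangible_assets", ["intangible", "goodwill", "trademark", "patent"]),
   ("depreciation", ["depreciation", "depreciate"]),
   ("impairment", ["impairment", "impair", "write-down", "write down"]),
   ("debt", ["loan", "debt", "borrow", "borrowing", "credit"]),
   ("equity", ["equity", "stock", "share", "capital"]),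
   ("investments", ["investment", "invest", "security", "securities"]),
   ("business_combinations", ["acquisition", "merge", "merger", "acquire"]),
   ("contingencies", ["contingent", "contingency", "lawsuit", "litigation"]),
   ("fair_value", ["fair value", "market value"]),
   ("income_taxes", ["tax", "income tax"]),
   ("foreign_currency", ["foreign", "currency", "exchange rate"]),
   ("stock_compensation", ["stock option", "equity award", "stock award"]),
   ("pensions", ["pension", "retirement", "benefit"]),
   ("accruals", ["accrual", "accrue", "provision"])]

def pvPriorityOrder : List String :=
  ["revenue_recognition", "leases", "inventory", "fixed_assets",
   "intangible_assets", "depreciation", "impairment"]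

def identify_transaction_type_py (transaction_description : String) : String :=
  let desc_lower := PySem.Str.lower transaction_description
  -- inner 'for keyword … break' = does any keyword of the entry occur in desc_lower
  let matching_types := pvKeywordTable.foldl
    (fun acc entry =>
      if entry.2.any (fun keyword => PySem.Str.isIn keyword desc_lower) then
        acc ++ [entry.1]
      else acc) []
  if matching_types.isEmpty then "general"
  else
    match pvPriorityOrder.find? (fun priority_type => matching_types.contains priority_type) with
    | some priority_type => priority_type
    | none => matching_types.headD ""   -- matching_types[0]; list is nonempty here

-- ===== PORT B =====
-- B's flat module constant _KEYWORD_TYPES: (keyword, transaction type) pairs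
def pvKeywordTypes : List (String × String) :=
  [("revenue", "revenue_recognition"),
   ("sales", "revenue_recognition"),
   ("income", "revenue_recognition"),
   ("customer", "revenue_recognition"),
   ("contract", "revenue_recognition"),
   ("lease", "leases"),
   ("rent", "leases"),
   ("rental", "leases"),
   ("inventory", "inventory"),
   ("stock", "inventory"),
   ("goods", "inventory"),
   ("merchandise", "inventory"),
   ("equipment", "fixed_assets"),
   ("property", "fixed_assets"),
   ("plant", "fixed_assets"),
   ("building", "fixed_assets"),
   ("machine", "fixed_assets"),
   ("intangible", "intangible_assets"),
   ("goodwill", "intangible_assets"),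
   ("trademark", "intangible_assets"),
   ("patent", "intangible_assets"),
   ("depreciation", "depreciation"),
   ("depreciate", "depreciation"),
   ("impairment", "impairment"),
   ("impair", "impairment"),
   ("write-down", "impairment"),
   ("write down", "impairment"),
   ("loan", "debt"),
   ("debt", "debt"),
   ("borrow", "debt"),
   ("borrowing", "debt"),
   ("credit", "debt"),
   ("equity", "equity"),
   ("stock", "equity"),
   ("share", "equity"),
   ("capital", "equity"),
   ("investment", "investments"),
   ("invest", "investments"),
   ("security", "investments"),
   ("securities", "investments"),
   ("acquisition", "business_combinations"),
   ("merge", "business_combinations"),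
   ("merger", "business_combinations"),
   ("acquire", "business_combinations"),
   ("contingent", "contingencies"),
   ("contingency", "contingencies"),
   ("lawsuit", "contingencies"),
   ("litigation", "contingencies"),
   ("fair value", "fair_value"),
   ("market value", "fair_value"),
   ("tax", "income_taxes"),
   ("income tax", "income_taxes"),
   ("foreign", "foreign_currency"),
   ("currency", "foreign_currency"),
   ("exchange rate", "foreign_currency"),
   ("stock option", "stock_compensation"),
   ("equity award", "stock_compensation"),
   ("stock award", "stock_compensation"),
   ("pension", "pensions"),
   ("retirement", "pensions"),
   ("benefit", "pensions"),
   ("accrual", "accruals"),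
   ("accrue", "accruals"),
   ("provision", "accruals")]

def identify_transaction_type_py_alt (transaction_description : String) : String :=
  let desc_lower := PySem.Str.lower transaction_description
  match pvKeywordTypes.find? (fun p => PySem.Str.isIn p.1 desc_lower) with
  | some p => p.2
  | none => "general"

-- ===== PRECONDITION & SPEC =====
def Spec_identify_transaction_type_py (transaction_description : String) (out : String) : Prop := out = identify_transaction_type_py_alt transaction_description
instance (transaction_description : String) (out : String) : Decidable (Spec_identify_transaction_type_py transaction_description out) := by unfold Spec_identify_transaction_type_py; infer_instance

-- ===== CLAIM (what is proved, stated in full; the proofs are below) =====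
def Claim_equal_identify_transaction_type_py : Prop := ∀ (transaction_description : String), Dom_identify_transaction_type_py transaction_description → Spec_identify_transaction_type_py transaction_description (identify_transaction_type_py transaction_description)

-- ===== LEMMAS AND PROOFS =====

-- proof-side middle form: first table entry (dict order) with a keyword in desc
def pvFirstMatch (table : List (String × List String)) (desc : String) : String :=
  match table with
  | [] => "general"
  | (tx_type, keywords) :: rest =>
      if keywords.any (fun keyword => PySem.Str.isIn keyword desc) then tx_type
      else pvFirstMatch rest desc

-- the per-entry match test, for a fixed lowered description
def pvHit (desc : String) (entry : String × List String) : Bool :=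
  entry.2.any (fun keyword => PySem.Str.isIn keyword desc)

-- B's flat list is the flattening of A's table
theorem pvFlat_eq :
    pvKeywordTypes
      = pvKeywordTable.flatMap (fun e => e.2.map (fun kw => (kw, e.1))) := by decide

-- scanning the flattening for the first matching keyword = first matching entry
theorem pvFlat_find (table : List (String × List String)) (desc : String) :
    (match (table.flatMap (fun e => e.2.map (fun kw => (kw, e.1)))).find?
        (fun p => PySem.Str.isIn p.1 desc) with
     | some p => p.2
     | none => "general")
      = pvFirstMatch table desc := by
  induction table with
  | nil => rfl
  | cons e rest ih =>
    obtain ⟨t, kws⟩ := e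
    rw [List.flatMap_cons, List.find?_append]
    rw [show pvFirstMatch ((t, kws) :: rest) desc
          = (if (kws.any fun keyword => PySem.Str.isIn keyword desc) then t
             else pvFirstMatch rest desc) from rfl]
    by_cases h : (kws.any fun keyword => PySem.Str.isIn keyword desc) = true
    · obtain ⟨kw, hmem, hkw⟩ := List.any_eq_true.mp h
      have hsome : ((kws.map fun kw => (kw, t)).find? fun p => PySem.Str.isIn p.1 desc).isSome := by
        rw [List.find?_isSome]
        exact ⟨(kw, t), List.mem_map_of_mem hmem, hkw⟩
      obtain ⟨p, hp⟩ := Option.isSome_iff_exists.mp hsome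
      have hp2 : p.2 = t := by
        obtain ⟨q, hq, rfl⟩ := List.mem_map.mp (List.mem_of_find?_eq_some hp)
        rfl
      rw [hp, Option.some_or, if_pos h]
      exact hp2
    · have hnone : ((kws.map fun kw => (kw, t)).find? fun p => PySem.Str.isIn p.1 desc) = none := by
        rw [List.find?_eq_none]
        intro p hp
        obtain ⟨kw, hkw, rfl⟩ := List.mem_map.mp hp
        simp only
        intro hin
        exact h (List.any_eq_true.mpr ⟨kw, hkw, hin⟩)
      rw [hnone, Option.none_or, if_neg h]
      exact ih

-- B's scan returns the head of the matched-keys list (table order), "general" if none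
theorem pvFirstMatch_eq_headD (table : List (String × List String)) (desc : String) :
    pvFirstMatch table desc = ((table.filter (pvHit desc)).map Prod.fst).headD "general" := by
  induction table with
  | nil => rfl
  | cons e rest ih =>
    obtain ⟨t, kws⟩ := e
    have he : (kws.any fun keyword => PySem.Str.isIn keyword desc) = pvHit desc (t, kws) := rfl
    simp only [pvFirstMatch, List.filter_cons, he]
    by_cases h : pvHit desc (t, kws) = true
    · simp [h]
    · simp [h, ih]

-- the priority scan over keys ks finds exactly the head of m1, when m1 is a sublist of
-- the nodup list ks and m2 is disjoint from ks
theorem pvFind_priority (ks m1 m2 : List String)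
    (hsub : m1.Sublist ks) (hnd : ks.Nodup) (hdisj : ∀ x ∈ m2, x ∉ ks) :
    ks.find? (fun p => (m1 ++ m2).contains p) = m1.head? := by
  induction hsub with
  | slnil =>
    simp only [List.nil_append, List.head?_nil]
    rw [List.find?_eq_none]
    intro x hx
    simp only [List.contains_eq_mem, decide_eq_true_eq]
    exact fun hm => hdisj x hm hx
  | @cons m1' ks' k hs ih =>
    have hk1 : k ∉ m1' := fun hm => (List.nodup_cons.mp hnd).1 (hs.subset hm)
    have hk2 : k ∉ m2 := fun hm => hdisj k hm List.mem_cons_self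
    rw [List.find?_cons_of_neg, ih (List.nodup_cons.mp hnd).2
        (fun x hx hk => hdisj x hx (List.mem_cons_of_mem _ hk))]
    simp only [List.contains_eq_mem, decide_eq_true_eq, List.mem_append]
    rintro (h | h)
    · exact hk1 h
    · exact hk2 h
  | @cons₂ m1' ks' k hs ih =>
    rw [List.find?_cons_of_pos]
    · simp
    · simp [List.contains_eq_mem]

-- A's fold is the matched-keys list in table order
theorem pvMatching_eq (desc : String) :
    pvKeywordTable.foldl
      (fun acc entry =>
        if entry.2.any (fun keyword => PySem.Str.isIn keyword desc) then acc ++ [entry.1]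
        else acc) []
      = (pvKeywordTable.filter (pvHit desc)).map Prod.fst := by
  simpa [pvHit] using
    PySem.List.foldl_append_if (pvHit desc) Prod.fst pvKeywordTable []

-- A equals the first-match scan of its table
theorem pvA_eq_firstMatch (td : String) :
    identify_transaction_type_py td = pvFirstMatch pvKeywordTable (PySem.Str.lower td) := by
  unfold identify_transaction_type_py
  simp only [pvFirstMatch_eq_headD, pvMatching_eq]
  generalize PySem.Str.lower td = desc
  have hsplit : pvKeywordTable.filter (pvHit desc)
      = (pvKeywordTable.take 7).filter (pvHit desc) ++ (pvKeywordTable.drop 7).filter (pvHit desc) := by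
    rw [← List.filter_append, List.take_append_drop]
  rw [hsplit, List.map_append]
  have hfind := pvFind_priority ((pvKeywordTable.take 7).map Prod.fst)
      (((pvKeywordTable.take 7).filter (pvHit desc)).map Prod.fst)
      (((pvKeywordTable.drop 7).filter (pvHit desc)).map Prod.fst)
      (List.Sublist.map _ List.filter_sublist) (by decide)
      (fun x hx => by
        have hx2 : x ∈ (pvKeywordTable.drop 7).map Prod.fst :=
          (List.Sublist.map Prod.fst List.filter_sublist).subset hx
        have hall : ∀ y ∈ (pvKeywordTable.drop 7).map Prod.fst,
            y ∉ (pvKeywordTable.take 7).map Prod.fst := by decide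
        exact hall x hx2)
  have hprio : pvPriorityOrder = (pvKeywordTable.take 7).map Prod.fst := by decide
  rw [hprio, hfind]
  cases h1 : ((pvKeywordTable.take 7).filter (pvHit desc)).map Prod.fst with
  | cons x xs => simp
  | nil =>
    cases h2 : ((pvKeywordTable.drop 7).filter (pvHit desc)).map Prod.fst with
    | nil => simp
    | cons y ys => simp

-- ===== VERDICT (by name: the statement is the Claim_ definition above) =====
theorem identify_transaction_type_py_spec : Claim_equal_identify_transaction_type_py := by
  intro td _
  unfold Spec_identify_transaction_type_py identify_transaction_type_py_alt
  rw [pvA_eq_firstMatch, pvFlat_eq, pvFlat_find]
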